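-- pv_equiv track=rewrite | github.com/billebel/splunk-community-ai | knowledge-packs/splunk_enterprise/transforms/transforms/search.py | _detect_basic_patterns
-- ===== SOURCE A (Python) =====
-- from typing import Dict, List, Any, Optional, Tuple
-- from collections import Counter, defaultdict
--
-- def _detect_basic_patterns(results: List[Dict]) -> Dict[str, List[Dict]]:
--     """Basic pattern detection for small context LLMs"""
--     patterns = defaultdict(list)
--
--     for event in results:
--         signature_fields = []
--
--         # Use minimal fields for pattern detection
--         for field in ['sourcetype', 'EventCode']:
--             if field in event:
--                 signature_fields.append(f"{field}={event[field]}")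
--                 break  # Only use first match
--
--         if not signature_fields:
--             signature_fields.append("unknown_pattern")
--
--         pattern_key = signature_fields[0]  # Use single field only
--         patterns[pattern_key].append(event)
--
--     return dict(patterns)
-- ===== SOURCE B (Python) =====
-- def _detect_basic_patterns(results):
--     """Basic pattern detection: two-pass grouping — compute each event's
--     signature key, dedup keys in first-occurrence order, then build each
--     group by filtering (instead of A's single hash-bucketing pass)."""
--     def keyfn(event):
--         if 'sourcetype' in event:
--             return f"sourcetype={event['sourcetype']}"
--         if 'EventCode' in event:
--             return f"EventCode={event['EventCode']}"
--         return "unknown_pattern"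
--     keys = list(dict.fromkeys(map(keyfn, results)))
--     return {k: [e for e in results if keyfn(e) == k] for k in keys}
-- ===== Notes on version B (the rewrite author's own statement) =====
-- stated objective: alternative
-- what changed: Replaces A's single-pass defaultdict bucketing with a two-pass comprehension: dedup the signature keys in first-occurrence order, then build each group by filtering the event list per key.
import Mathlib
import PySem

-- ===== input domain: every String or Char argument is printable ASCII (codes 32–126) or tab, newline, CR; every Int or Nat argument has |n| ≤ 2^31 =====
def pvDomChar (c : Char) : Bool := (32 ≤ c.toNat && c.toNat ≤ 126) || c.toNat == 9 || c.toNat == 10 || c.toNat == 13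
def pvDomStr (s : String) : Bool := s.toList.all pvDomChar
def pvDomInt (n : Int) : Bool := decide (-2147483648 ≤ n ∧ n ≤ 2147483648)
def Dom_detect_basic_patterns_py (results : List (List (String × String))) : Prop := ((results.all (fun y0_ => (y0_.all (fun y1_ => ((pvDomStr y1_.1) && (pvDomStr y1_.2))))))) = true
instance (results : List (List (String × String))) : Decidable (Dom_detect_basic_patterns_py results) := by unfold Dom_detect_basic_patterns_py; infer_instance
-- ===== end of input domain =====

-- B replaces A's single-pass defaultdict bucketing by a two-pass dedup-keys-then-filter grouping (alternative decomposition, same result).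


-- ===== PORT A =====
-- the inner 'for field in [...]: if field in event: append; break' loop
-- ('field in event' then 'event[field]' is one first-match lookup, = Dict.get?)
def pvSigLoopA (event : List (String × String)) : List String → List String
  | [] => []
  | f :: rest =>
    match (PySem.Dict.mk event).get? f with
    | some v => [f ++ "=" ++ v]
    | none => pvSigLoopA event rest

def detect_basic_patterns_py (results : List (List (String × String))) : List (String × List (List (String × String))) :=
  (results.foldl (fun patterns event =>
      let signature_fields := pvSigLoopA event ["sourcetype", "EventCode"]
      let signature_fields := if signature_fields = [] then ["unknown_pattern"] else signature_fields
      let pattern_key := signature_fields.headD ""   -- signature_fields[0]; the list is nonempty here, so headD is exact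
      patterns.modify pattern_key [] (· ++ [event]))   -- defaultdict(list): patterns[pattern_key].append(event)
    PySem.Dict.empty).items

-- ===== PORT B =====
def pvKeyB (event : List (String × String)) : String :=
  match (PySem.Dict.mk event).get? "sourcetype" with
  | some v => "sourcetype=" ++ v
  | none =>
    match (PySem.Dict.mk event).get? "EventCode" with
    | some v => "EventCode=" ++ v
    | none => "unknown_pattern"

def detect_basic_patterns_py_alt (results : List (List (String × String))) : List (String × List (List (String × String))) :=
  (PySem.List.dedup (results.map pvKeyB)).map
    (fun k => (k, results.filter (fun e => pvKeyB e == k)))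

-- ===== PRECONDITION & SPEC =====
def Spec_detect_basic_patterns_py (results : List (List (String × String))) (out : List (String × List (List (String × String)))) : Prop := out = detect_basic_patterns_py_alt results
instance (results : List (List (String × String))) (out : List (String × List (List (String × String)))) : Decidable (Spec_detect_basic_patterns_py results out) := by unfold Spec_detect_basic_patterns_py; infer_instance

-- ===== CLAIM (what is proved, stated in full; the proofs are below) =====
def Claim_equal_detect_basic_patterns_py : Prop := ∀ (results : List (List (String × String))), Dom_detect_basic_patterns_py results → Spec_detect_basic_patterns_py results (detect_basic_patterns_py results)

-- ===== LEMMAS AND PROOFS =====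

-- A's per-event pattern_key computation equals B's key function
theorem pvKeyA_eq_keyB (event : List (String × String)) :
    ((if pvSigLoopA event ["sourcetype", "EventCode"] = [] then ["unknown_pattern"]
      else pvSigLoopA event ["sourcetype", "EventCode"]).headD "") = pvKeyB event := by
  simp only [pvSigLoopA, pvKeyB]
  cases (PySem.Dict.mk event).get? "sourcetype" <;>
    cases (PySem.Dict.mk event).get? "EventCode" <;> simp

theorem detect_eq (results : List (List (String × String))) :
    detect_basic_patterns_py results = detect_basic_patterns_py_alt results := by
  unfold detect_basic_patterns_py detect_basic_patterns_py_alt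
  simp only [pvKeyA_eq_keyB]
  have hnd : (results.foldl (fun d e => d.modify (pvKeyB e) [] (· ++ [e]))
      (PySem.Dict.empty : PySem.Dict String (List (List (String × String))))).keys.Nodup :=
    PySem.Dict.nodup_keys_foldl_modify_key results pvKeyB [] _ _ (by simp [pysem])
  rw [PySem.Dict.items_eq_map_keys _ hnd []]
  rw [PySem.Dict.keys_foldl_modify_key]
  simp only [PySem.Dict.keys_empty, PySem.Set.update_nil_left, PySem.List.dedup_eq_ofList]
  apply List.map_congr_left
  intro k _
  have hfold : results.foldl (fun d e => d.modify (pvKeyB e) [] (· ++ [e]))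
      (PySem.Dict.empty : PySem.Dict String (List (List (String × String))))
      = (results.map (fun e => (pvKeyB e, e))).foldl
          (fun d p => d.modify p.1 [] (· ++ [p.2])) PySem.Dict.empty := by
    rw [List.foldl_map]
  rw [hfold, PySem.Dict.getD_foldl_modify_append]
  simp [List.filter_map, Function.comp_def]

-- ===== VERDICT (by name: the statement is the Claim_ definition above) =====
theorem detect_basic_patterns_py_spec : Claim_equal_detect_basic_patterns_py := by
  intro results _
  unfold Spec_detect_basic_patterns_py
  exact detect_eq results
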